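-- pv_equiv track=rewrite | github.com/kagemeka/cptol | atcoder-submissions/jp.atcoder/abc115/abc115_d/9431239.py | make_burger
-- ===== SOURCE A (Python) =====
-- def make_burger(n):
--     patty = [None] * (n + 1)
--     bun = [None] * (n + 1)
--     patty[0] = 1
--     bun[0] = 0
--     burger = [None] * (n + 1)
--     burger[0] = 1
--     for i in range(n):
--         patty[i+1] = patty[i] * 2 + 1
--         bun[i+1] = bun[i] * 2 + 2
--         burger[i+1] = patty[i+1] + bun[i+1]
--
--     return patty, bun, burger
-- ===== SOURCE B (Python) =====
-- def make_burger(n):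
--     patty = [(1 << (i + 1)) - 1 for i in range(n + 1)]
--     bun = [(1 << (i + 1)) - 2 for i in range(n + 1)]
--     burger = [(1 << (i + 2)) - 3 for i in range(n + 1)]
--     return patty, bun, burger
-- ===== Notes on version B (the rewrite author's own statement) =====
-- stated objective: simpler
-- what changed: Replaces the sequential recurrence loop over preallocated None-lists with three independent comprehensions computing each element in closed form (patty[i]=2^(i+1)-1, bun[i]=2^(i+1)-2, burger[i]=2^(i+2)-3).
-- crash fix: For n < 0 A raises IndexError (it assigns index 0 of an empty list) while B returns three empty lists; Pre_ excludes n < 0. — e.g. on make_burger(-1): A raises IndexError, B returns ([], [], [])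
import Mathlib
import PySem

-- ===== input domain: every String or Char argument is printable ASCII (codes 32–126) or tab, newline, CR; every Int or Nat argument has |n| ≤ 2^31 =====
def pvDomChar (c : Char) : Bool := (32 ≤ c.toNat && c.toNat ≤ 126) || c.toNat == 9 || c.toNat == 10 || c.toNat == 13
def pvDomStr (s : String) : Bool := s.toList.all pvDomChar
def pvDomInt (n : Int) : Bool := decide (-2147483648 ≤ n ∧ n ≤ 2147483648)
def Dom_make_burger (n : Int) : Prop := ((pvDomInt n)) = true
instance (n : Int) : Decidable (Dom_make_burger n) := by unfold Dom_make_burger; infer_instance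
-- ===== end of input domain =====

-- B replaces A's sequential recurrence loop with independent closed-form comprehensions (simpler).

-- ===== PORT A =====
-- A's loop writes patty[i+1], bun[i+1], burger[i+1] from the previously written entries;
-- the port carries the three lists in reverse (most recently written value at the head).
def pvStepA (st : List Int × List Int × List Int) (_i : Int) : List Int × List Int × List Int :=
  let p := st.1.headI * 2 + 1
  let b := st.2.1.headI * 2 + 2
  (p :: st.1, b :: st.2.1, (p + b) :: st.2.2)

def make_burger (n : Int) : List Int × List Int × List Int :=
  let st := (PySem.List.pyRange 0 n 1).foldl pvStepA ([1], [0], [1])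
  (st.1.reverse, st.2.1.reverse, st.2.2.reverse)

-- ===== PORT B =====
-- Source B's '(1 << (i+1)) - 1' is ported as '2 ^ (i.toNat + 1) - 1': exact, since 1 << k = 2^k for k ≥ 0
-- (i ranges over range(n+1), so i ≥ 0).
def make_burger_alt (n : Int) : List Int × List Int × List Int :=
  ((PySem.List.pyRange 0 (n + 1) 1).map (fun i => 2 ^ (i.toNat + 1) - 1),
   (PySem.List.pyRange 0 (n + 1) 1).map (fun i => 2 ^ (i.toNat + 1) - 2),
   (PySem.List.pyRange 0 (n + 1) 1).map (fun i => 2 ^ (i.toNat + 2) - 3))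

-- ===== PRECONDITION & SPEC =====
-- Pre_ excludes n < 0, on which Python A raises IndexError (assigning index 0 of an empty list).
def Pre_make_burger (n : Int) : Prop := 0 ≤ n
instance (n : Int) : Decidable (Pre_make_burger n) := by unfold Pre_make_burger; infer_instance
def pvWitness_make_burger : Int := 3

-- For n < 0 A raises IndexError while B returns three empty lists.
def Raises_make_burger (n : Int) : Prop := n < 0
instance (n : Int) : Decidable (Raises_make_burger n) := by unfold Raises_make_burger; infer_instance
def pvRaiseWitness_make_burger : Int := -1
def pvRaiseWitnessOut_make_burger : List Int × List Int × List Int := ([], [], [])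

def Spec_make_burger (n : Int) (out : List Int × List Int × List Int) : Prop := out = make_burger_alt n
instance (n : Int) (out : List Int × List Int × List Int) : Decidable (Spec_make_burger n out) := by unfold Spec_make_burger; infer_instance

-- ===== CLAIM (what is proved, stated in full; the proofs are below) =====
def Claim_equal_make_burger : Prop := ∀ (n : Int), Dom_make_burger n → Pre_make_burger n → Spec_make_burger n (make_burger n)
def Claim_raises_make_burger : Prop := (∀ (n : Int), Dom_make_burger n → Raises_make_burger n → ¬ Pre_make_burger n) ∧ (Dom_make_burger (pvRaiseWitness_make_burger) ∧ Raises_make_burger (pvRaiseWitness_make_burger) ∧ make_burger_alt (pvRaiseWitness_make_burger) = pvRaiseWitnessOut_make_burger)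

-- ===== LEMMAS AND PROOFS =====

theorem pvLoopA (k : Nat) :
    (PySem.List.pyRange 0 k 1).foldl pvStepA ([1], [0], [1]) =
      (((List.range (k + 1)).map (fun i => 2 ^ (i + 1) - 1)).reverse,
       ((List.range (k + 1)).map (fun i => 2 ^ (i + 1) - 2)).reverse,
       ((List.range (k + 1)).map (fun i => 2 ^ (i + 2) - 3)).reverse) := by
  induction k with
  | zero => simp [PySem.List.pyRange_one_eq_nil, List.range_succ]
  | succ k ih =>
      rw [show ((k + 1 : Nat) : Int) = (k : Int) + 1 by push_cast; ring,
        PySem.List.pyRange_one_succ_right (by positivity), List.foldl_append, ih]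
      simp only [List.foldl, pvStepA, List.range_succ, List.map_append, List.reverse_append,
        List.map_cons, List.map_nil]
      refine Prod.ext ?_ (Prod.ext ?_ ?_) <;>
        simp [List.headI] <;> ring

theorem make_burger_spec : Claim_equal_make_burger := by
  intro n _ hpre
  unfold Spec_make_burger make_burger make_burger_alt
  lift n to Nat using hpre with k
  rw [pvLoopA k, show ((k : Int) + 1) = ((k + 1 : Nat) : Int) by push_cast; ring,
    PySem.List.pyRange_zero_nat]
  simp [List.map_map, Function.comp_def]

@[simp] theorem make_burger_raises : Claim_raises_make_burger := by
  unfold Claim_raises_make_burger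
  constructor
  · intro n _ hr hp; unfold Raises_make_burger at hr; unfold Pre_make_burger at hp; omega
  · exact ⟨by decide, by decide, by decide⟩
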